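-- pv_equiv track=rewrite | github.com/jakubhorvath/Kojima_et_al_2021_PNAS | scripts/ORF_search/find_ORF.py | parse_to_three_frames
-- ===== SOURCE A (Python) =====
-- def parse_to_three_frames(pos_list):
--     frame1_list=[]
--     frame2_list=[]
--     frame3_list=[]
--     for pos in pos_list:
--         if   pos[0] % 3 == 0: frame1_list.append(pos)
--         elif pos[0] % 3 == 1: frame2_list.append(pos)
--         elif pos[0] % 3 == 2: frame3_list.append(pos)
--     return [frame1_list, frame2_list, frame3_list]
-- ===== SOURCE B (Python) =====
-- def parse_to_three_frames(pos_list):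
--     return [[p for p in pos_list if p[0] % 3 == 0],
--             [p for p in pos_list if p[0] % 3 == 1],
--             [p for p in pos_list if p[0] % 3 == 2]]
-- ===== Notes on version B (the rewrite author's own statement) =====
-- stated objective: simpler
-- what changed: Replaced the single accumulating loop dispatching into three mutable buckets with three independent filter comprehensions, one per mod-3 remainder class.
import Mathlib
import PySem

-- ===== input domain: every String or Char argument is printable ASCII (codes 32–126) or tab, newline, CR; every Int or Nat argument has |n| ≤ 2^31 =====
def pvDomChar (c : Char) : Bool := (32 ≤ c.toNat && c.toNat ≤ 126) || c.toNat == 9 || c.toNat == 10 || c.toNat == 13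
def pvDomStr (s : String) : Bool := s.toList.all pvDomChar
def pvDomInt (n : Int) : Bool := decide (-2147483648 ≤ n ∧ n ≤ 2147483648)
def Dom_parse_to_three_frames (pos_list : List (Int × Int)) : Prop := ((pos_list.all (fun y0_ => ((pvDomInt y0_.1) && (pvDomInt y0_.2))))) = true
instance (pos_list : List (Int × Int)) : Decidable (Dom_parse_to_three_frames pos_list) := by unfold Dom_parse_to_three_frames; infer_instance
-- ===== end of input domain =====

-- B replaces A's single bucket-dispatch loop with three independent per-frame filters (simpler decomposition; return value only).
-- ===== PORT A =====
-- One pass; triple accumulator (frame1, frame2, frame3), appending to the matching bucket.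
def parse_to_three_frames (pos_list : List (Int × Int)) : List (List (Int × Int)) :=
  let acc := pos_list.foldl
    (fun (st : List (Int × Int) × List (Int × Int) × List (Int × Int)) pos =>
      if PySem.Int.mod pos.1 3 = 0 then (st.1 ++ [pos], st.2.1, st.2.2)
      else if PySem.Int.mod pos.1 3 = 1 then (st.1, st.2.1 ++ [pos], st.2.2)
      else if PySem.Int.mod pos.1 3 = 2 then (st.1, st.2.1, st.2.2 ++ [pos])
      else st)
    ([], [], [])
  [acc.1, acc.2.1, acc.2.2]

-- ===== PORT B =====
-- Three independent filters, one per remainder class.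
def parse_to_three_frames_alt (pos_list : List (Int × Int)) : List (List (Int × Int)) :=
  [pos_list.filter (fun p => PySem.Int.mod p.1 3 = 0),
   pos_list.filter (fun p => PySem.Int.mod p.1 3 = 1),
   pos_list.filter (fun p => PySem.Int.mod p.1 3 = 2)]

-- ===== PRECONDITION & SPEC =====
def Spec_parse_to_three_frames (pos_list : List (Int × Int)) (out : List (List (Int × Int))) : Prop := out = parse_to_three_frames_alt pos_list
instance (pos_list : List (Int × Int)) (out : List (List (Int × Int))) : Decidable (Spec_parse_to_three_frames pos_list out) := by unfold Spec_parse_to_three_frames; infer_instance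

-- ===== CLAIM (what is proved, stated in full; the proofs are below) =====
def Claim_equal_parse_to_three_frames : Prop := ∀ (pos_list : List (Int × Int)), Dom_parse_to_three_frames pos_list → Spec_parse_to_three_frames pos_list (parse_to_three_frames pos_list)

-- ===== LEMMAS AND PROOFS =====
theorem pv_fold_inv (pos_list : List (Int × Int)) (a b c : List (Int × Int)) :
    pos_list.foldl
      (fun (st : List (Int × Int) × List (Int × Int) × List (Int × Int)) pos =>
        if PySem.Int.mod pos.1 3 = 0 then (st.1 ++ [pos], st.2.1, st.2.2)
        else if PySem.Int.mod pos.1 3 = 1 then (st.1, st.2.1 ++ [pos], st.2.2)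
        else if PySem.Int.mod pos.1 3 = 2 then (st.1, st.2.1, st.2.2 ++ [pos])
        else st)
      (a, b, c)
    = (a ++ pos_list.filter (fun p => PySem.Int.mod p.1 3 = 0),
       b ++ pos_list.filter (fun p => PySem.Int.mod p.1 3 = 1),
       c ++ pos_list.filter (fun p => PySem.Int.mod p.1 3 = 2)) := by
  induction pos_list generalizing a b c with
  | nil => simp
  | cons p t ih =>
    have hmod : PySem.Int.mod p.1 3 = p.1 % 3 := by
      unfold PySem.Int.mod
      rw [Int.fmod_eq_emod]
      simp
    have h : p.1 % 3 = 0 ∨ p.1 % 3 = 1 ∨ p.1 % 3 = 2 := by omega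
    rcases h with h | h | h
    · rw [List.foldl_cons, if_pos (by rw [hmod, h]), ih]
      simp [List.filter_cons, h]
      omega
    · rw [List.foldl_cons, if_neg (by rw [hmod, h]; decide), if_pos (by rw [hmod, h]), ih]
      simp [List.filter_cons, h]
      omega
    · rw [List.foldl_cons, if_neg (by rw [hmod, h]; decide), if_neg (by rw [hmod, h]; decide),
        if_pos (by rw [hmod, h]), ih]
      simp [List.filter_cons, h]
      omega

theorem parse_to_three_frames_spec_aux (pos_list : List (Int × Int)) :
    parse_to_three_frames pos_list = parse_to_three_frames_alt pos_list := by
  simp only [parse_to_three_frames, parse_to_three_frames_alt, pv_fold_inv, List.nil_append]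

-- ===== VERDICT (by name: the statement is the Claim_ definition above) =====
theorem parse_to_three_frames_spec : Claim_equal_parse_to_three_frames := by
  intro pos_list _
  exact parse_to_three_frames_spec_aux pos_list
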